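-- pv_equiv track=rewrite | github.com/lewiswigmore/builder-agent | tools/supply_chain/sigchain_guardian.py | proof_for_index
-- ===== SOURCE A (Python) =====
-- from typing import Dict, List, Optional, Tuple, Any
--
-- def proof_for_index(tree: List[List[str]], idx: int) -> List[Tuple[str, str]]:
--     # returns list of (sibling_hash, direction) where direction is 'L' if sibling is left, 'R' if right
--     proof = []
--     index = idx
--     for level in range(0, len(tree) - 1):
--         nodes = tree[level]
--         if index % 2 == 0:
--             sibling_index = index + 1 if index + 1 < len(nodes) else index
--             direction = 'R'
--         else:
--             sibling_index = index - 1
--             direction = 'L'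
--         sibling = nodes[sibling_index]
--         proof.append((sibling, direction))
--         index //= 2
--     return proof
-- ===== SOURCE B (Python) =====
-- def proof_for_index(tree, idx):
--     # Structural recursion on the list of levels instead of an index loop:
--     # emit the partner at the first level, then recurse on the remaining levels
--     # with the parent index.  The sibling is computed branch-free for the pairing:
--     # idx + 1 - 2*(idx % 2) flips the pairing bit, and min(..., len-1) clamps the
--     # unpaired last node (where A falls back to the node itself).
--     if len(tree) < 2:
--         return []
--     nodes = tree[0]
--     sib = min(idx + 1 - 2 * (idx % 2), len(nodes) - 1)
--     direction = 'L' if idx % 2 else 'R'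
--     return [(nodes[sib], direction)] + proof_for_index(tree[1:], idx // 2)
-- ===== Notes on version B (the rewrite author's own statement) =====
-- stated objective: alternative
-- what changed: B recurses structurally on the list of levels (peel the first level, recurse on the tail with the parent index idx//2) and computes the sibling branch-free as min(idx + 1 - 2*(idx % 2), len(nodes) - 1) instead of A's index loop over range(len(tree)-1) with parity branches and an explicit clamp.
import Mathlib
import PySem

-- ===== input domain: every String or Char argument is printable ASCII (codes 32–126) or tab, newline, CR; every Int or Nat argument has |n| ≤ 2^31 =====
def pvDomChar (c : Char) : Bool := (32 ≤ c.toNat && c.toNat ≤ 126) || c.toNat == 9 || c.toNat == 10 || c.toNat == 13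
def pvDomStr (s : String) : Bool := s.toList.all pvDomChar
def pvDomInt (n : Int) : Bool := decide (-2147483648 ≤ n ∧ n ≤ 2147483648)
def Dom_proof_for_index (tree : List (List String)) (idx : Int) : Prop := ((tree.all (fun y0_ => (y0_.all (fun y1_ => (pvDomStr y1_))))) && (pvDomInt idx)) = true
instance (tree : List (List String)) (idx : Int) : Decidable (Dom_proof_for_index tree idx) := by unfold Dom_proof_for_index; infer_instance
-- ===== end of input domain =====

-- B recurses structurally on the list of levels (tail + parent index idx//2) with a
-- branch-free min-clamped sibling, instead of A's index loop with parity branches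
-- (objective: alternative decomposition, same cost).

-- ===== PORT A =====
-- the body of A's for-loop, threading the state (proof, index)
def pfiStepA (tree : List (List String)) (st : List (String × String) × Int) (level : Int) :
    List (String × String) × Int :=
  let nodes := PySem.List.pyGetD tree level []
  let sd : Int × String :=
    if PySem.Int.mod st.2 2 = 0 then
      ((if st.2 + 1 < (nodes.length : Int) then st.2 + 1 else st.2), "R")
    else (st.2 - 1, "L")
  let sibling := PySem.List.pyGetD nodes sd.1 ""
  (st.1 ++ [(sibling, sd.2)], PySem.Int.floordiv st.2 2)

def proof_for_index (tree : List (List String)) (idx : Int) : List (String × String) :=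
  ((PySem.List.pyRange 0 ((tree.length : Int) - 1) 1).foldl (pfiStepA tree) ([], idx)).1

-- ===== PORT B =====
-- structural recursion on the levels, as in Source B: emit the partner at the first
-- level (sib = min(idx + 1 - 2*(idx % 2), len(nodes) - 1)), recurse on the tail
def proof_for_index_alt (tree : List (List String)) (idx : Int) : List (String × String) :=
  match tree with
  | [] => []
  | [_] => []
  | nodes :: rest =>
      let m := PySem.Int.mod idx 2
      let sib := min (idx + 1 - 2 * m) ((nodes.length : Int) - 1)
      let direction := if m = 0 then "R" else "L"
      (PySem.List.pyGetD nodes sib "", direction) :: proof_for_index_alt rest (PySem.Int.floordiv idx 2)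

-- ===== PRECONDITION & SPEC =====
-- the sibling index A will use at a level, for index i at that level
def pvSibIdx (nodesLen : Int) (i : Int) : Int :=
  if PySem.Int.mod i 2 = 0 then (if i + 1 < nodesLen then i + 1 else i) else i - 1

-- Pre_ excludes exactly the inputs on which Python raises IndexError: at some level the
-- sibling index nodes[sibling_index] is out of Python's index range.
def Pre_proof_for_index (tree : List (List String)) (idx : Int) : Prop :=
  ∀ k, k < tree.length - 1 →
    PySem.Raise.InRange (tree.getD k []).length
      (pvSibIdx ((tree.getD k []).length : Int) (PySem.Int.floordiv idx (2 ^ k)))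

instance (tree : List (List String)) (idx : Int) : Decidable (Pre_proof_for_index tree idx) := by
  unfold Pre_proof_for_index; infer_instance

def pvWitness_proof_for_index : List (List String) × Int :=
  ([["a", "b", "c", "d"], ["ab", "cd"], ["abcd"]], 2)

def Spec_proof_for_index (tree : List (List String)) (idx : Int) (out : List (String × String)) : Prop := out = proof_for_index_alt tree idx
instance (tree : List (List String)) (idx : Int) (out : List (String × String)) : Decidable (Spec_proof_for_index tree idx out) := by unfold Spec_proof_for_index; infer_instance

-- ===== CLAIM (what is proved, stated in full; the proofs are below) =====
def Claim_equal_proof_for_index : Prop := ∀ (tree : List (List String)) (idx : Int), Dom_proof_for_index tree idx → Pre_proof_for_index tree idx → Spec_proof_for_index tree idx (proof_for_index tree idx)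

-- ===== LEMMAS AND PROOFS =====

lemma pfi_InRange_iff (n : Nat) (i : Int) :
    PySem.Raise.InRange n i ↔ (-(n : Int) ≤ i ∧ i < n) := by
  unfold PySem.Raise.InRange; omega

-- halving once then shifting k more times is shifting k+1 times
lemma pfi_halve (idx : Int) (k : Nat) :
    PySem.Int.floordiv (PySem.Int.floordiv idx 2) (2 ^ k) = PySem.Int.floordiv idx (2 ^ (k + 1)) := by
  have h1 : (0:Int) < 2 ^ k := by positivity
  rw [PySem.Int.floordiv_eq_ediv_of_pos h1, PySem.Int.floordiv_eq_ediv_of_pos (by norm_num : (0:Int) < 2),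
      PySem.Int.floordiv_eq_ediv_of_pos (by positivity : (0:Int) < 2 ^ (k + 1))]
  rw [Int.ediv_ediv_of_nonneg (by norm_num : (0:Int) ≤ 2)]
  ring_nf

lemma pfi_floordiv_one (idx : Int) : PySem.Int.floordiv idx (2 ^ (0 : Nat)) = idx := by
  rw [PySem.Int.floordiv_eq_ediv_of_pos (by norm_num : (0:Int) < 2 ^ (0:Nat))]
  simp

-- under A's in-range condition the two sibling computations agree
lemma pfi_sib_eq (n : Nat) (i : Int)
    (h : PySem.Raise.InRange n (pvSibIdx (n : Int) i)) :
    pvSibIdx (n : Int) i = min (i + 1 - 2 * PySem.Int.mod i 2) ((n : Int) - 1) := by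
  rw [pfi_InRange_iff] at h
  unfold pvSibIdx at *
  rw [PySem.Int.mod_eq_emod_of_pos (by norm_num : (0:Int) < 2)] at *
  rcases le_total (i + 1 - 2 * (i % 2)) ((n : Int) - 1) with hle | hle <;>
    [rw [min_eq_left hle]; rw [min_eq_right hle]] <;> split_ifs at * <;> omega

-- A's loop body at level 0 of a cons tree produces B's head entry and the parent index
lemma pfi_step0 (nodes : List String) (rest : List (List String))
    (acc : List (String × String)) (idx : Int)
    (h : PySem.Raise.InRange nodes.length (pvSibIdx (nodes.length : Int) idx)) :
    pfiStepA (nodes :: rest) (acc, idx) 0 =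
      (acc ++ [(PySem.List.pyGetD nodes
          (min (idx + 1 - 2 * PySem.Int.mod idx 2) ((nodes.length : Int) - 1)) "",
        if PySem.Int.mod idx 2 = 0 then "R" else "L")],
       PySem.Int.floordiv idx 2) := by
  rw [show min (idx + 1 - 2 * PySem.Int.mod idx 2) ((nodes.length : Int) - 1) =
      pvSibIdx (nodes.length : Int) idx from (pfi_sib_eq nodes.length idx h).symm]
  unfold pfiStepA pvSibIdx
  rw [show PySem.List.pyGetD (nodes :: rest) (0 : Int) ([] : List String) = nodes from by
    simp [PySem.List.pyGetD_zero_cons]]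
  by_cases hd : (2 : Int) ∣ idx <;> simp [hd]

-- A's loop body at a shifted level of a cons tree is its body on the tail
lemma pfi_step_shift (nodes : List String) (rest : List (List String))
    (st : List (String × String) × Int) (k : Nat) :
    pfiStepA (nodes :: rest) st (((k + 1 : Nat)) : Int) = pfiStepA rest st (k : Int) := by
  unfold pfiStepA
  rw [show PySem.List.pyGetD (nodes :: rest) (((k + 1 : Nat)) : Int) ([] : List String) =
      PySem.List.pyGetD rest (k : Int) [] from by
    simp only [PySem.List.pyGetD_natCast]; simp [List.getD]]

-- the precondition passes to the tail with the parent index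
lemma pfi_pre_tail (nodes : List String) (rest : List (List String)) (idx : Int)
    (h : Pre_proof_for_index (nodes :: rest) idx) :
    Pre_proof_for_index rest (PySem.Int.floordiv idx 2) := by
  intro k hk
  rw [pfi_halve]
  have := h (k + 1) (by simp only [List.length_cons]; omega)
  simpa [List.getD] using this

-- main invariant: A's fold over the level indices appends B's result to the accumulator
lemma pfi_main : ∀ (tree : List (List String)) (idx : Int) (acc : List (String × String)),
    Pre_proof_for_index tree idx →
    ((List.range (tree.length - 1)).foldl (fun st (k : Nat) => pfiStepA tree st (k : Int))
        (acc, idx)).1 = acc ++ proof_for_index_alt tree idx := by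
  intro tree
  induction tree with
  | nil => intro idx acc _; simp [proof_for_index_alt]
  | cons nodes rest ih =>
    intro idx acc hpre
    cases rest with
    | nil => simp [proof_for_index_alt]
    | cons r rs =>
      have h0 : PySem.Raise.InRange nodes.length (pvSibIdx (nodes.length : Int) idx) := by
        have := hpre 0 (by simp)
        simpa [pfi_floordiv_one] using this
      have hlen : (nodes :: r :: rs).length - 1 = rs.length + 1 := by simp
      rw [hlen, List.range_succ_eq_map, List.foldl_cons, List.foldl_map]
      rw [show ((0 : Nat) : Int) = (0 : Int) from rfl, pfi_step0 nodes (r :: rs) acc idx h0]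
      have hfun : (fun (st : List (String × String) × Int) (k : Nat) =>
          pfiStepA (nodes :: r :: rs) st ((k.succ : Nat) : Int)) =
          (fun st (k : Nat) => pfiStepA (r :: rs) st (k : Int)) := by
        funext st k
        exact pfi_step_shift nodes (r :: rs) st k
      rw [hfun]
      have hlen2 : rs.length = (r :: rs).length - 1 := by simp
      rw [hlen2, ih (PySem.Int.floordiv idx 2) _ (pfi_pre_tail nodes (r :: rs) idx hpre)]
      conv_rhs => rw [show proof_for_index_alt (nodes :: r :: rs) idx =
        (PySem.List.pyGetD nodes
            (min (idx + 1 - 2 * PySem.Int.mod idx 2) ((nodes.length : Int) - 1)) "",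
          if PySem.Int.mod idx 2 = 0 then "R" else "L") ::
          proof_for_index_alt (r :: rs) (PySem.Int.floordiv idx 2) from rfl]
      simp

-- ===== VERDICT (by name: the statement is the Claim_ definition above) =====
theorem proof_for_index_spec : Claim_equal_proof_for_index := by
  intro tree idx _ hpre
  unfold Spec_proof_for_index proof_for_index
  rw [PySem.List.pyRange_one]
  have ht : (((tree.length : Int) - 1 - 0)).toNat = tree.length - 1 := by omega
  rw [ht, List.foldl_map]
  simpa using pfi_main tree idx [] hpre
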